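-- pv_equiv track=rewrite | github.com/fernwehjc/stanCode_Projects | stanCode_projects/hangman_game/similarity.py | homology
-- ===== SOURCE A (Python) =====
-- def homology(long_sequence, short_sequence):
--     """
--     Cross-compare to find the strand of long sequence with the highest similarity with the short sequence.
--     :param long_sequence: str
--     :param short_sequence: str
--     :return ans: str, the strand of long sequence with the highest similarity with the short sequence
--     """
--     # number of characters in the long sequence
--     i = len(long_sequence)
--     # number of characters in the short sequence
--     j = len(short_sequence)
--     # number of the same element between long- and short- sequence in a certain part of the long sequence
--     max_match = 0
--     # position where the max_match begins in long sequence
--     max_match_point = 0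
--     ans = ''
--     # (i - j +  1) = times needed for cross-comparison
--     for k in range(i - j + 1):
--         match = 0
--         for n in range(j):
--             # if find the same element in the same position of long- and short- sequence, count one
--             if short_sequence[n] == long_sequence[n+k]:
--                 match += 1
--         # find the biggest match, and the start position(k) in long sequence
--         if match > max_match:
--             max_match = match
--             max_match_point = k
--     # the strand of long sequence with the highest similarity with the short sequence
--     ans = long_sequence[max_match_point:(max_match_point + j)]
--     return ans
-- ===== SOURCE B (Python) =====
-- def _lower_bound(a, x):
--     """First index at which x could be inserted into sorted list a (leftmost)."""
--     lo = 0
--     hi = len(a)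
--     while lo < hi:
--         mid = (lo + hi) // 2
--         if a[mid] < x:
--             lo = mid + 1
--         else:
--             hi = mid
--     return lo
--
--
-- def homology(long_sequence, short_sequence):
--     """Index positions of each character of the long sequence once, then count
--     per-offset matches only where characters actually coincide, restricting each
--     scan to the valid offset window by binary search."""
--     i = len(long_sequence)
--     j = len(short_sequence)
--     pos = {}
--     for p, c in enumerate(long_sequence):
--         pos.setdefault(c, []).append(p)
--     offsets = []
--     for n, c in enumerate(short_sequence):
--         ps = pos.get(c, [])
--         offsets.extend(p - n for p in ps[_lower_bound(ps, n):_lower_bound(ps, n + (i - j) + 1)])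
--     counts = {}
--     for k in offsets:
--         counts[k] = counts.get(k, 0) + 1
--     best = 0
--     best_k = 0
--     for k in range(i - j + 1):
--         if counts.get(k, 0) > best:
--             best = counts.get(k, 0)
--             best_k = k
--     return long_sequence[best_k:best_k + j]
-- ===== Notes on version B (the rewrite author's own statement) =====
-- stated objective: alternative
-- what changed: Instead of re-scanning the short sequence at every offset, B builds an index of each character's positions in the long sequence, collects one offset entry per actual character coincidence (window-restricted by binary search) into a histogram, and picks the first offset with the strictly largest tally.
import Mathlib
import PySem

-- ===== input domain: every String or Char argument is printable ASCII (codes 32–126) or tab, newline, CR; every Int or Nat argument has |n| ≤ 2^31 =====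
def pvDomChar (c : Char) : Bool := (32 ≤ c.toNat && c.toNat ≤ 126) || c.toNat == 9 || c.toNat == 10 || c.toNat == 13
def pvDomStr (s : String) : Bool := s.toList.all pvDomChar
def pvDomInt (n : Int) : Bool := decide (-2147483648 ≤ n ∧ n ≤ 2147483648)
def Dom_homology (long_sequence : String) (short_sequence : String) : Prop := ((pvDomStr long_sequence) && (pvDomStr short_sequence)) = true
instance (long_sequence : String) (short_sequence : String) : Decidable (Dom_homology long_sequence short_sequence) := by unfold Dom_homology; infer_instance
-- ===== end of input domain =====

-- B indexes the long sequence's character positions once and tallies matches per offset,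
-- instead of re-scanning the short sequence at every offset (objective: alternative algorithm, same worst-case cost).

-- ===== PORT A =====
def homology (long_sequence : String) (short_sequence : String) : String :=
  let L := long_sequence.toList
  let S := short_sequence.toList
  let i : Int := L.length
  let j : Int := S.length
  -- for k in range(i - j + 1): recompute match by scanning the short sequence; keep first strict max
  let res := (PySem.List.pyRange 0 (i - j + 1)).foldl
    (fun (st : Int × Int) k =>
      let m := (PySem.List.pyRange 0 j).foldl
        (fun (m : Int) n =>
          if PySem.List.pyGet? S n == PySem.List.pyGet? L (n + k) then m + 1 else m) 0
      if m > st.1 then (m, k) else st) (0, 0)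
  PySem.Str.slice long_sequence (some res.2) (some (res.2 + j))

-- ===== PORT B =====
-- helper of Source B: leftmost insertion point of x in the sorted list a (hand-written binary search)
def lowerBoundAux (a : List Int) (x : Int) (lo hi : Int) : Int :=
  if h : lo < hi then
    let mid := PySem.Int.floordiv (lo + hi) 2
    if PySem.List.pyGetD a mid 0 < x then lowerBoundAux a x (mid + 1) hi
    else lowerBoundAux a x lo mid
  else lo
termination_by (hi - lo).toNat
decreasing_by
  · have h1 := PySem.Int.floordiv_two_mid_bounds (le_of_lt h)
    omega
  · have h2 : PySem.Int.floordiv (lo + hi) 2 < hi := by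
      rw [PySem.Int.floordiv_lt_iff_lt_mul (by omega)]
      omega
    omega

def lowerBound (a : List Int) (x : Int) : Int := lowerBoundAux a x 0 (a.length : Int)

def homology_alt (long_sequence : String) (short_sequence : String) : String :=
  let L := long_sequence.toList
  let S := short_sequence.toList
  let i : Int := L.length
  let j : Int := S.length
  -- pos: positions of each character of the long sequence
  let pos := (PySem.List.enumerate L 0).foldl
    (fun d q => d.modify q.2 [] (· ++ [q.1])) (PySem.Dict.empty : PySem.Dict Char (List Int))
  -- offsets: one entry per character coincidence inside the valid offset window
  let offsets := (PySem.List.enumerate S 0).foldl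
    (fun acc q =>
      let ps := pos.getD q.2 []
      acc ++ (PySem.List.slice ps (some (lowerBound ps q.1))
        (some (lowerBound ps (q.1 + (i - j) + 1)))).map (fun p => p - q.1)) []
  -- counts[k] = number of coincidences at offset k
  let counts := offsets.foldl
    (fun d k => d.insert k (d.getD k 0 + 1)) (PySem.Dict.empty : PySem.Dict Int Int)
  let res := (PySem.List.pyRange 0 (i - j + 1)).foldl
    (fun (st : Int × Int) k => if counts.getD k 0 > st.1 then (counts.getD k 0, k) else st) (0, 0)
  PySem.Str.slice long_sequence (some res.2) (some (res.2 + j))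

-- ===== PRECONDITION & SPEC =====
def Spec_homology (long_sequence : String) (short_sequence : String) (out : String) : Prop := out = homology_alt long_sequence short_sequence
instance (long_sequence : String) (short_sequence : String) (out : String) : Decidable (Spec_homology long_sequence short_sequence out) := by unfold Spec_homology; infer_instance

-- ===== CLAIM (what is proved, stated in full; the proofs are below) =====
def Claim_equal_homology : Prop := ∀ (long_sequence : String) (short_sequence : String), Dom_homology long_sequence short_sequence → Spec_homology long_sequence short_sequence (homology long_sequence short_sequence)

-- ===== LEMMAS AND PROOFS =====

def posList (xs : List Char) (c : Char) : List Int :=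
  ((PySem.List.enumerate xs 0).filter (fun q => q.2 == c)).map (fun q => q.1)

theorem pos_getD (L : List Char) (c : Char) :
    ((PySem.List.enumerate L 0).foldl (fun d q => d.modify q.2 [] (· ++ [q.1]))
      (PySem.Dict.empty : PySem.Dict Char (List Int))).getD c []
    = posList L c := by
  have h : (PySem.List.enumerate L 0).foldl (fun d q => d.modify q.2 [] (· ++ [q.1]))
      (PySem.Dict.empty : PySem.Dict Char (List Int))
      = ((PySem.List.enumerate L 0).map (fun q => (q.2, q.1))).foldl
        (fun d p => d.modify p.1 [] (· ++ [p.2])) PySem.Dict.empty := by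
    rw [List.foldl_map]
  rw [h, PySem.Dict.getD_foldl_modify_append]
  simp [posList, List.filter_map, List.map_map, Function.comp_def]

theorem count_enum (xs : List Char) (c : Char) (s t : Int) :
    (((PySem.List.enumerate xs s).filter (fun q => q.2 == c)).map (fun q => q.1)).count t
    = if 0 ≤ t - s ∧ (t - s).toNat < xs.length ∧ xs[(t - s).toNat]? = some c then 1 else 0 := by
  induction xs generalizing s with
  | nil => simp
  | cons x xs ih =>
    rw [PySem.List.enumerate_cons, List.filter_cons]
    by_cases hts : t = s
    · subst hts
      have h0 : (t - t).toNat = 0 := by omega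
      have hz : ¬ (0 ≤ t - (t + 1)) := by omega
      by_cases hx : (x == c) = true
      · rw [if_pos hx]
        simp [List.count_cons, ih (t+1), hz, h0, eq_of_beq hx]
      · rw [if_neg hx]
        rw [ih (t+1)]
        have hxc : ¬ (x = c) := by intro h; subst h; simp at hx
        simp [hz, h0, hxc]
    · have step : (((if (x == c) = true then (s, x) :: (PySem.List.enumerate xs (s+1)).filter (fun q => q.2 == c)
              else (PySem.List.enumerate xs (s+1)).filter (fun q => q.2 == c))).map (fun q => q.1)).count t
          = (((PySem.List.enumerate xs (s+1)).filter (fun q => q.2 == c)).map (fun q => q.1)).count t := by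
        by_cases hx : (x == c) = true
        · simp [hx, List.count_cons, Ne.symm hts]
        · simp [hx]
      rw [step, ih (s+1)]
      by_cases hlt : s < t
      · have hu : (t - s).toNat = (t - (s+1)).toNat + 1 := by omega
        rw [hu]
        simp only [List.getElem?_cons_succ, List.length_cons]
        have hiff : (0 ≤ t - (s+1) ∧ (t - (s+1)).toNat < xs.length ∧ xs[(t - (s+1)).toNat]? = some c)
            ↔ (0 ≤ t - s ∧ (t - (s+1)).toNat + 1 < xs.length + 1 ∧ xs[(t - (s+1)).toNat]? = some c) := by
          constructor <;> intro h <;> exact ⟨by omega, by omega, h.2.2⟩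
        exact if_congr hiff rfl rfl
      · have h1 : ¬ (0 ≤ t - (s+1)) := by omega
        have h2 : ¬ (0 ≤ t - s) := by omega
        rw [if_neg (by tauto), if_neg (by tauto)]

theorem count_posList (xs : List Char) (c : Char) (t : Int) :
    (posList xs c).count t
    = if 0 ≤ t ∧ t.toNat < xs.length ∧ xs[t.toNat]? = some c then 1 else 0 := by
  have := count_enum xs c 0 t
  simpa [posList] using this

theorem sum_eq_countP (l : List Nat) (p : Nat → Bool) (h : Nat → Nat)
    (H : ∀ m ∈ l, h m = if p m then 1 else 0) : (l.map h).sum = l.countP p := by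
  induction l with
  | nil => simp
  | cons a l ih =>
    simp only [List.map_cons, List.sum_cons, List.countP_cons]
    rw [H a (by simp), ih (fun m hm => H m (by simp [hm]))]
    by_cases hp : p a = true <;> simp [hp] <;> omega

theorem countP_of_prefix (l : List Int) (p : Int → Bool) (m : Nat) (hm : m ≤ l.length)
    (h1 : ∀ (u : Nat) (hu : u < l.length), u < m → p l[u] = true)
    (h2 : ∀ (u : Nat) (hu : u < l.length), m ≤ u → ¬ p l[u] = true) :
    l.countP p = m := by
  induction l generalizing m with
  | nil => simp at hm ⊢; omega
  | cons a l ih =>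
    rw [List.countP_cons]
    cases m with
    | zero =>
      have ha : ¬ p a = true := h2 0 (by simp) (by omega)
      have : l.countP p = 0 := ih 0 (by omega)
        (fun u hu h => by omega)
        (fun u hu h => by
          have := h2 (u+1) (by simpa using Nat.succ_lt_succ hu) (by omega)
          simpa using this)
      simp [this, ha]
    | succ m' =>
      have ha : p a = true := h1 0 (by simp) (by omega)
      have : l.countP p = m' := ih m' (by simpa using hm)
        (fun u hu h => by
          have := h1 (u+1) (by simpa using Nat.succ_lt_succ hu) (by omega)
          simpa using this)
        (fun u hu h => by
          have := h2 (u+1) (by simpa using Nat.succ_lt_succ hu) (by omega)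
          simpa using this)
      simp [this, ha]

theorem lbAux_spec (a : List Int) (x : Int) (ha : a.Pairwise (· ≤ ·)) :
    ∀ (N : Nat) (lo hi : Int), (hi - lo).toNat ≤ N →
    0 ≤ lo → lo ≤ hi → hi ≤ (a.length : Int) →
    (∀ (u : Nat) (hu : u < a.length), (u : Int) < lo → a[u] < x) →
    (∀ (u : Nat) (hu : u < a.length), hi ≤ (u : Int) → ¬ a[u] < x) →
    lowerBoundAux a x lo hi = ((a.countP (fun p => decide (p < x)) : Nat) : Int) := by
  have terminal : ∀ lo : Int, 0 ≤ lo → lo ≤ (a.length : Int) →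
      (∀ (u : Nat) (hu : u < a.length), (u : Int) < lo → a[u] < x) →
      (∀ (u : Nat) (hu : u < a.length), lo ≤ (u : Int) → ¬ a[u] < x) →
      lo = ((a.countP (fun p => decide (p < x)) : Nat) : Int) := by
    intro lo hlo hlen hb hab
    have : a.countP (fun p => decide (p < x)) = lo.toNat := by
      apply countP_of_prefix a _ lo.toNat (by omega)
        (fun u hu h => by simpa using hb u hu (by omega))
        (fun u hu h => by simpa using hab u hu (by omega))
    omega
  intro N
  induction N with
  | zero =>
    intro lo hi hN hlo hlohi hhi hb hab
    have heq : lo = hi := by omega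
    rw [lowerBoundAux, dif_neg (by omega)]
    exact terminal lo hlo (by omega) hb (fun u hu h => hab u hu (by omega))
  | succ N ih =>
    intro lo hi hN hlo hlohi hhi hb hab
    rw [lowerBoundAux]
    by_cases h : lo < hi
    · rw [dif_pos h]
      dsimp only []
      have hmb := PySem.Int.floordiv_two_mid_bounds (le_of_lt h)
      set mid := PySem.Int.floordiv (lo + hi) 2 with hmid
      have hmlt : mid < hi := by
        rw [hmid, PySem.Int.floordiv_lt_iff_lt_mul (by omega)]
        omega
      have hmlen : mid.toNat < a.length := by omega
      have hget : PySem.List.pyGetD a mid 0 = a[mid.toNat] := by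
        rw [PySem.List.pyGetD_of_nonneg a 0 (by omega), List.getD_eq_getElem a 0 hmlen]
      rw [hget]
      by_cases hcmp : a[mid.toNat] < x
      · rw [if_pos hcmp]
        apply ih (mid+1) hi (by omega) (by omega) (by omega) hhi
        · intro u hu hult
          by_cases hu2 : (u : Int) < lo
          · exact hb u hu hu2
          · have hle : u ≤ mid.toNat := by omega
            rcases Nat.lt_or_ge u mid.toNat with hlt | hge
            · have := List.pairwise_iff_getElem.mp ha u mid.toNat hu hmlen hlt
              omega
            · have : u = mid.toNat := by omega
              subst this; exact hcmp
        · exact hab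
      · rw [if_neg hcmp]
        apply ih lo mid (by omega) hlo (by omega) (by omega) hb
        intro u hu hge
        by_cases he : u = mid.toNat
        · subst he; exact hcmp
        · have hlt : mid.toNat < u := by omega
          have := List.pairwise_iff_getElem.mp ha mid.toNat u hmlen hu hlt
          omega
    · rw [dif_neg h]
      exact terminal lo hlo (by omega) hb (fun u hu hge => hab u hu (by omega))

theorem lowerBound_eq (a : List Int) (ha : a.Pairwise (· ≤ ·)) (x : Int) :
    lowerBound a x = ((a.countP (fun p => decide (p < x)) : Nat) : Int) := by
  apply lbAux_spec a x ha a.length 0 (a.length : Int) (by omega) (by omega) (by omega) (by omega)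
  · intro u hu h; omega
  · intro u hu h; omega





theorem take_drop_filter (ps : List Int) (hs : ps.Pairwise (· ≤ ·)) (x y : Int) :
    List.take (ps.countP (fun p => decide (p < y)) - ps.countP (fun p => decide (p < x)))
      (List.drop (ps.countP (fun p => decide (p < x))) ps)
    = ps.filter (fun p => decide (x ≤ p) && decide (p < y)) := by
  induction ps with
  | nil => simp
  | cons a ps ih =>
    rw [List.pairwise_cons] at hs
    obtain ⟨hall, hs'⟩ := hs
    have hih := ih hs'
    by_cases hax : a < x <;> by_cases hay : a < y
    · have hxa : ¬ x ≤ a := by omega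
      simp only [List.countP_cons, List.filter_cons, hax, hay, hxa, decide_true, decide_false,
        Bool.and_true, if_true, if_false, Bool.false_eq_true, List.drop_succ_cons]
      rw [Nat.add_sub_add_right]
      exact hih
    · have hxa : ¬ x ≤ a := by omega
      have hcy : ps.countP (fun p => decide (p < y)) = 0 := by
        rw [List.countP_eq_zero]; intro p hp; have := hall p hp; simp; omega
      have hfe : ps.filter (fun p => decide (x ≤ p) && decide (p < y)) = [] := by
        rw [List.filter_eq_nil_iff]; intro p hp; have := hall p hp; simp; intro _; omega
      simp only [List.countP_cons, List.filter_cons, hax, hay, hxa, decide_true, decide_false,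
        Bool.and_true, Bool.and_false, if_true, if_false, Bool.false_eq_true, List.drop_succ_cons]
      simp [hcy, hfe]
    · have hxa : x ≤ a := by omega
      have hcx : ps.countP (fun p => decide (p < x)) = 0 := by
        rw [List.countP_eq_zero]; intro p hp; have := hall p hp; simp; omega
      rw [hcx] at hih
      simp only [List.countP_cons, List.filter_cons, hax, hay, hxa, decide_true, decide_false,
        Bool.and_true, Bool.true_and, if_true, if_false, Bool.false_eq_true, List.drop_succ_cons]
      simp only [hcx, Nat.add_zero, Nat.zero_add, Nat.sub_zero, List.drop_zero] at hih ⊢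
      rw [List.take_succ_cons, hih]
    · have hxa : x ≤ a := by omega
      have hcx : ps.countP (fun p => decide (p < x)) = 0 := by
        rw [List.countP_eq_zero]; intro p hp; have := hall p hp; simp; omega
      have hcy : ps.countP (fun p => decide (p < y)) = 0 := by
        rw [List.countP_eq_zero]; intro p hp; have := hall p hp; simp; omega
      have hfe : ps.filter (fun p => decide (x ≤ p) && decide (p < y)) = [] := by
        rw [List.filter_eq_nil_iff]; intro p hp; have := hall p hp; simp; intro _; omega
      simp only [List.countP_cons, List.filter_cons, hax, hay, hxa, decide_true, decide_false,
        Bool.and_true, Bool.and_false, Bool.true_and, if_true, if_false, Bool.false_eq_true]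
      simp [hcx, hcy, hfe]

theorem filter_map_win (ps : List Int) (n w : Int) :
    (ps.filter (fun p => decide (n ≤ p) && decide (p < n + w + 1))).map (fun p => p - n)
    = ps.filterMap (fun p => if 0 ≤ p - n ∧ p - n ≤ w then some (p - n) else none) := by
  induction ps with
  | nil => simp
  | cons a ps ih =>
    rw [List.filter_cons, List.filterMap_cons]
    by_cases hc : 0 ≤ a - n ∧ a - n ≤ w
    · have hb : (decide (n ≤ a) && decide (a < n + w + 1)) = true := by
        simp only [Bool.and_eq_true, decide_eq_true_eq]; constructor <;> omega
      rw [hb, if_pos rfl, if_pos hc, List.map_cons, ih]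
    · have hb : (decide (n ≤ a) && decide (a < n + w + 1)) = false := by
        simp only [Bool.and_eq_false_iff, decide_eq_false_iff_not]
        by_cases h1 : n ≤ a
        · right; omega
        · left; exact h1
      rw [hb, if_neg (by simp), if_neg hc, ih]


theorem posList_sorted (L : List Char) (c : Char) : (posList L c).Pairwise (· ≤ ·) := by
  unfold posList
  rw [List.pairwise_map]
  apply List.Pairwise.imp (fun {p q} h => le_of_lt h)
  exact List.Pairwise.filter _ (PySem.List.pairwise_lt_enumerate L 0)

theorem main_eq (long_sequence short_sequence : String) :
    (let L := long_sequence.toList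
     let S := short_sequence.toList
     let i : Int := L.length
     let j : Int := S.length
     let res := (PySem.List.pyRange 0 (i - j + 1)).foldl
       (fun (st : Int × Int) k =>
         let m := (PySem.List.pyRange 0 j).foldl
           (fun (m : Int) n =>
             if PySem.List.pyGet? S n == PySem.List.pyGet? L (n + k) then m + 1 else m) 0
         if m > st.1 then (m, k) else st) (0, 0)
     PySem.Str.slice long_sequence (some res.2) (some (res.2 + j)))
    = (let L := long_sequence.toList
     let S := short_sequence.toList
     let i : Int := L.length
     let j : Int := S.length
     let pos := (PySem.List.enumerate L 0).foldl
       (fun d q => d.modify q.2 [] (· ++ [q.1])) (PySem.Dict.empty : PySem.Dict Char (List Int))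
     let offsets := (PySem.List.enumerate S 0).foldl
       (fun acc q =>
         let ps := pos.getD q.2 []
         acc ++ (PySem.List.slice ps (some (lowerBound ps q.1))
           (some (lowerBound ps (q.1 + (i - j) + 1)))).map (fun p => p - q.1)) []
     let counts := offsets.foldl
       (fun d k => d.insert k (d.getD k 0 + 1)) (PySem.Dict.empty : PySem.Dict Int Int)
     let res := (PySem.List.pyRange 0 (i - j + 1)).foldl
       (fun (st : Int × Int) k => if counts.getD k 0 > st.1 then (counts.getD k 0, k) else st) (0, 0)
     PySem.Str.slice long_sequence (some res.2) (some (res.2 + j))) := by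
  dsimp only []
  set L := long_sequence.toList with hLdef
  set S := short_sequence.toList with hSdef
  set i : Int := (L.length : Int) with hidef
  set j : Int := (S.length : Int) with hjdef
  set pos := (PySem.List.enumerate L 0).foldl
       (fun d q => d.modify q.2 [] (· ++ [q.1])) (PySem.Dict.empty : PySem.Dict Char (List Int)) with hposdef
  set offsets := (PySem.List.enumerate S 0).foldl
       (fun acc q =>
         let ps := pos.getD q.2 []
         acc ++ (PySem.List.slice ps (some (lowerBound ps q.1))
           (some (lowerBound ps (q.1 + (i - j) + 1)))).map (fun p => p - q.1)) ([] : List Int) with hoffdef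
  set counts := offsets.foldl
       (fun d k => d.insert k (d.getD k 0 + 1)) (PySem.Dict.empty : PySem.Dict Int Int) with hcntdef
  have hcount : ∀ k : Int, 0 ≤ k → k ≤ i - j →
      ((PySem.List.pyRange 0 j).foldl
        (fun (m : Int) n => if PySem.List.pyGet? S n == PySem.List.pyGet? L (n + k) then m + 1 else m) 0)
      = counts.getD k 0 := by
    intro k hk0 hk1
    have hij : S.length ≤ L.length := by omega
    rw [PySem.List.foldl_count_if (fun n => PySem.List.pyGet? S n == PySem.List.pyGet? L (n + k)) _ 0]
    rw [zero_add]
    rw [hjdef, PySem.List.pyRange_zero_natCast, List.countP_map]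
    rw [hcntdef, PySem.Dict.getD_foldl_insert_add_one, PySem.Dict.getD_empty, zero_add]
    rw [hoffdef, PySem.List.foldl_append_eq_flatMap, List.nil_append]
    rw [List.count_flatMap]
    have henum : PySem.List.enumerate S 0 = (PySem.List.pyRange 0 j).map (fun u => (u, PySem.List.pyGetD S u 'a')) := by
      have := PySem.List.enumerate_eq_map_pyRange S 'a'
      simpa [PySem.List.len, hjdef] using this
    rw [henum, List.map_map, hjdef, PySem.List.pyRange_zero_natCast, List.map_map]
    refine Nat.cast_inj.mpr (sum_eq_countP _ _ _ ?_).symm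
    intro m hm
    have hmS : m < S.length := List.mem_range.mp hm
    have hmk : m + k.toNat < L.length := by omega
    simp only [Function.comp]
    rw [PySem.List.pyGetD_natCast, List.getD_eq_getElem S 'a' hmS]
    rw [pos_getD]
    have hsort := posList_sorted L (S[m]'hmS)
    rw [lowerBound_eq _ hsort, lowerBound_eq _ hsort, PySem.List.slice_natCast,
      take_drop_filter _ hsort, filter_map_win, List.count_filterMap]
    have hpred : (fun p : Int => ((if 0 ≤ p - (m : Int) ∧ p - (m : Int) ≤ i - (S.length : Int) then some (p - (m : Int)) else none) == some k)) = (fun p : Int => p == (m : Int) + k) := by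
      funext p
      by_cases hc : 0 ≤ p - (m : Int) ∧ p - (m : Int) ≤ i - (S.length : Int)
      · simp only [if_pos hc]
        have : (p - (m : Int) = k) ↔ (p = (m : Int) + k) := by omega
        simp [this]
      · simp only [if_neg hc]
        have h2 : ¬ (p = (m : Int) + k) := by omega
        simp [h2]
    rw [hpred, ← List.count_eq_countP, count_posList]
    have htn : ((m : Int) + k).toNat = m + k.toNat := by omega
    have hcond : (0 ≤ (m : Int) + k ∧ ((m : Int) + k).toNat < L.length ∧ L[((m : Int) + k).toNat]? = some (S[m]'hmS))
        ↔ L[m + k.toNat]? = some (S[m]'hmS) := by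
      rw [htn]
      constructor
      · intro h; exact h.2.2
      · intro h; exact ⟨by omega, hmk, h⟩
    rw [if_congr hcond rfl rfl]
    have hcast : (m : Int) + k = ((m + k.toNat : Nat) : Int) := by omega
    simp only [hcast, PySem.List.pyGet?_natCast, List.getElem?_eq_getElem hmS]
    by_cases he : L[m + k.toNat]? = some (S[m]'hmS)
    · simp [he]
    · simp only [if_neg he]
      have : (some (S[m]'hmS) == L[m + k.toNat]?) = false := by
        simp only [beq_eq_false_iff_ne, ne_eq]
        intro h; exact he h.symm
      simp only [this]
      simp
  have hsel : (PySem.List.pyRange 0 (i - j + 1)).foldl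
       (fun (st : Int × Int) k =>
         let m := (PySem.List.pyRange 0 j).foldl
           (fun (m : Int) n =>
             if PySem.List.pyGet? S n == PySem.List.pyGet? L (n + k) then m + 1 else m) 0
         if m > st.1 then (m, k) else st) (0, 0)
      = (PySem.List.pyRange 0 (i - j + 1)).foldl
       (fun (st : Int × Int) k => if counts.getD k 0 > st.1 then (counts.getD k 0, k) else st) (0, 0) := by
    apply PySem.List.foldl_congr_mem
    intro acc x hx
    rcases PySem.List.mem_pyRange_one.mp hx with ⟨hx0, hx1⟩
    simp only []
    rw [hcount x hx0 (by omega)]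
  rw [hsel]

-- ===== VERDICT (by name: the statement is the Claim_ definition above) =====
theorem homology_spec : Claim_equal_homology := by
  intro long_sequence short_sequence _
  unfold Spec_homology homology homology_alt
  exact main_eq long_sequence short_sequence
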